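-- pv_equiv track=rewrite | github.com/ddungiii/problem-solving | programmers/level2/python/택배_배달과_수거하기.py | solution
-- ===== SOURCE A (Python) =====
-- def solution(cap, n, deliveries, pickups):
--     distance = 0
--
--     d = 0
--     p = 0
--     for i in range(n - 1, -1, -1):
--         # 이번에 처리해야하는 양
--         d += deliveries[i]
--         p += pickups[i]
--
--         while d > 0 or p > 0:
--             distance += i + 1
--             # cap만큼 처리함
--             # 음수가 되면, 다음 차례에서 처리해야하는 양을 더할 때, 감안됨
--             d -= cap
--             p -= cap
--
--     return distance * 2
-- ===== SOURCE B (Python) =====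
-- def solution(cap, n, deliveries, pickups):
--     distance = 0
--     d = 0
--     p = 0
--     for i in range(n - 1, -1, -1):
--         d += deliveries[i]
--         p += pickups[i]
--         # number of trips needed at this point: ceiling division, never negative
--         trips = max(-(-d // cap), -(-p // cap), 0)
--         distance += trips * (i + 1)
--         d -= trips * cap
--         p -= trips * cap
--     return distance * 2
-- ===== Notes on version B (the rewrite author's own statement) =====
-- stated objective: alternative
-- what changed: The inner while loop (one iteration per trip) is replaced by a closed-form ceiling-division trip count max(ceil(d/cap), ceil(p/cap), 0) added once per position.
-- outside the precondition, e.g. on solution(0, 1, [0], [0]): A returns 0, B raises ZeroDivisionError; on solution(-3, 1, [-1], [-1]): A returns 0, B returns 2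
import Mathlib
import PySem

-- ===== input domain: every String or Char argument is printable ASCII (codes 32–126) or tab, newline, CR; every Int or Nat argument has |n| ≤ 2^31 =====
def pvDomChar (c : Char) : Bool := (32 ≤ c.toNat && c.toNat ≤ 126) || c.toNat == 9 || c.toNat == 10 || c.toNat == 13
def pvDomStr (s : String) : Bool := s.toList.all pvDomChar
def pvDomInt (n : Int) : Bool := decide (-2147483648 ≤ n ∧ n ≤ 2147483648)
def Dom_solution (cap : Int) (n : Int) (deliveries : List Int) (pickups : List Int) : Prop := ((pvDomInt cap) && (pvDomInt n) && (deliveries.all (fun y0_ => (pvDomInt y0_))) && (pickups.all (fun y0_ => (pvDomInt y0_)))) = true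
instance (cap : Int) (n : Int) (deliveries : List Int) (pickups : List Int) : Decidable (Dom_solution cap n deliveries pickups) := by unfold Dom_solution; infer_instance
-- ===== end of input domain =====

-- B replaces A's inner per-trip while loop by a closed-form ceiling-division trip count (alternative decomposition).

-- ===== PORT A =====
-- inner 'while d > 0 or p > 0' loop; fuel only makes it total (exhausted only when cap ≤ 0, outside Pre_)
def solInner (cap : Int) (i : Int) : Nat → Int × Int × Int → Int × Int × Int
  | 0, st => st
  | fuel + 1, (dist, d, p) =>
    if 0 < d ∨ 0 < p then solInner cap i fuel (dist + (i + 1), d - cap, p - cap) else (dist, d, p)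

def solution (cap : Int) (n : Int) (deliveries : List Int) (pickups : List Int) : Int :=
  let st := (PySem.List.pyRange (n - 1) (-1) (-1)).foldl
    (fun (st : Int × Int × Int) i =>
      let d := st.2.1 + PySem.List.pyGetD deliveries i 0
      let p := st.2.2 + PySem.List.pyGetD pickups i 0
      solInner cap i (d.toNat + p.toNat) (st.1, d, p)) (0, 0, 0)
  st.1 * 2

-- ===== PORT B =====
def solution_alt (cap : Int) (n : Int) (deliveries : List Int) (pickups : List Int) : Int :=
  let st := (PySem.List.pyRange (n - 1) (-1) (-1)).foldl
    (fun (st : Int × Int × Int) i =>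
      let d := st.2.1 + PySem.List.pyGetD deliveries i 0
      let p := st.2.2 + PySem.List.pyGetD pickups i 0
      let trips := max (max (-(PySem.Int.floordiv (-d) cap)) (-(PySem.Int.floordiv (-p) cap))) 0
      (st.1 + trips * (i + 1), d - trips * cap, p - trips * cap)) (0, 0, 0)
  st.1 * 2

-- ===== PRECONDITION & SPEC =====
-- Pre_ excludes cap ≤ 0 (A's while loop diverges whenever an accumulated demand is positive, and B's
-- ceiling division raises for cap = 0; for cap ≤ 0 with all demands nonpositive A happens to return 0)
-- and n exceeding a list length, where A raises IndexError.
def Pre_solution (cap : Int) (n : Int) (deliveries : List Int) (pickups : List Int) : Prop :=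
  1 ≤ cap ∧ n ≤ (deliveries.length : Int) ∧ n ≤ (pickups.length : Int)
instance (cap : Int) (n : Int) (deliveries : List Int) (pickups : List Int) : Decidable (Pre_solution cap n deliveries pickups) := by unfold Pre_solution; infer_instance

def pvWitness_solution : Int × Int × List Int × List Int := (4, 3, [1, 0, 3], [0, 3, 0])

def Spec_solution (cap : Int) (n : Int) (deliveries : List Int) (pickups : List Int) (out : Int) : Prop := out = solution_alt cap n deliveries pickups
instance (cap : Int) (n : Int) (deliveries : List Int) (pickups : List Int) (out : Int) : Decidable (Spec_solution cap n deliveries pickups out) := by unfold Spec_solution; infer_instance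

-- ===== CLAIM (what is proved, stated in full; the proofs are below) =====
def Claim_equal_solution : Prop := ∀ (cap : Int) (n : Int) (deliveries : List Int) (pickups : List Int), Dom_solution cap n deliveries pickups → Pre_solution cap n deliveries pickups → Spec_solution cap n deliveries pickups (solution cap n deliveries pickups)

-- ===== LEMMAS AND PROOFS =====

-- ceiling division helper facts
theorem ceil_le_of_le_zero (cap d : Int) (hcap : 1 ≤ cap) (hd : d ≤ 0) :
    -(PySem.Int.floordiv (-d) cap) ≤ 0 := by
  have h := (PySem.Int.le_floordiv_iff_mul_le (a := -d) (b := cap) (q := 0) (by omega)).2 (by omega)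
  omega

theorem one_le_ceil_of_pos (cap d : Int) (hcap : 1 ≤ cap) (hd : 0 < d) :
    1 ≤ -(PySem.Int.floordiv (-d) cap) := by
  have h := (PySem.Int.floordiv_lt_iff_lt_mul (a := -d) (b := cap) (q := 0) (by omega)).2 (by omega)
  omega

theorem ceil_le_self_of_pos (cap d : Int) (hcap : 1 ≤ cap) (hd : 0 < d) :
    -(PySem.Int.floordiv (-d) cap) ≤ d := by
  have h := (PySem.Int.le_floordiv_iff_mul_le (a := -d) (b := cap) (q := -d) (by omega)).2 (by nlinarith)
  omega

theorem ceil_sub_cap (cap d : Int) (hcap : 1 ≤ cap) :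
    -(PySem.Int.floordiv (-(d - cap)) cap) = -(PySem.Int.floordiv (-d) cap) - 1 := by
  have h1 : -(d - cap) = (-d) + cap := by ring
  have h2 : PySem.Int.floordiv ((-d) + cap) cap = PySem.Int.floordiv (-d) cap + 1 := by
    rw [PySem.Int.floordiv_eq_ediv_of_pos (by omega), PySem.Int.floordiv_eq_ediv_of_pos (by omega)]
    have : (-d) + cap = (-d) + 1 * cap := by ring
    rw [this, Int.add_mul_ediv_right _ _ (by omega : cap ≠ 0)]
  rw [h1, h2]; ring

-- the trip count B computes at state (d, p)
def tripsOf (cap d p : Int) : Int :=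
  max (max (-(PySem.Int.floordiv (-d) cap)) (-(PySem.Int.floordiv (-p) cap))) 0

-- A's inner while loop equals B's closed form, given enough fuel
theorem solInner_closed (cap i : Int) (hcap : 1 ≤ cap) :
    ∀ (fuel : Nat) (dist d p : Int), tripsOf cap d p ≤ (fuel : Int) →
      solInner cap i fuel (dist, d, p) =
        (dist + tripsOf cap d p * (i + 1), d - tripsOf cap d p * cap, p - tripsOf cap d p * cap) := by
  intro fuel
  induction fuel with
  | zero =>
    intro dist d p hf
    have h0 : 0 ≤ tripsOf cap d p := le_max_right _ _
    have ht : tripsOf cap d p = 0 := by omega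
    simp [solInner, ht]
  | succ m ih =>
    intro dist d p hf
    by_cases hpos : 0 < d ∨ 0 < p
    · have h1 : 1 ≤ tripsOf cap d p := by
        rcases hpos with hd | hp
        · have := one_le_ceil_of_pos cap d hcap hd
          have := le_max_left (-(PySem.Int.floordiv (-d) cap)) (-(PySem.Int.floordiv (-p) cap))
          unfold tripsOf; omega
        · have := one_le_ceil_of_pos cap p hcap hp
          have := le_max_right (-(PySem.Int.floordiv (-d) cap)) (-(PySem.Int.floordiv (-p) cap))
          unfold tripsOf; omega
      have hstep : tripsOf cap (d - cap) (p - cap) = tripsOf cap d p - 1 := by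
        unfold tripsOf at h1 ⊢
        rw [ceil_sub_cap cap d hcap, ceil_sub_cap cap p hcap]
        omega
      have hrec := ih (dist + (i + 1)) (d - cap) (p - cap) (by rw [hstep]; omega)
      simp only [solInner, if_pos hpos, hrec, hstep]
      simp only [Prod.mk.injEq]
      refine ⟨by ring, by ring, by ring⟩
    · rw [not_or, not_lt, not_lt] at hpos
      have ht : tripsOf cap d p = 0 := by
        have h1 := ceil_le_of_le_zero cap d hcap hpos.1
        have h2 := ceil_le_of_le_zero cap p hcap hpos.2
        unfold tripsOf; omega
      have hcond : ¬ (0 < d ∨ 0 < p) := by omega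
      simp [solInner, hcond, ht]

-- the fuel A's port supplies is always enough (cap ≥ 1)
theorem trips_le_fuel (cap d p : Int) (hcap : 1 ≤ cap) :
    tripsOf cap d p ≤ ((d.toNat + p.toNat : Nat) : Int) := by
  have hd : -(PySem.Int.floordiv (-d) cap) ≤ max d 0 := by
    by_cases h : 0 < d
    · have := ceil_le_self_of_pos cap d hcap h; omega
    · have := ceil_le_of_le_zero cap d hcap (by omega); omega
  have hp : -(PySem.Int.floordiv (-p) cap) ≤ max p 0 := by
    by_cases h : 0 < p
    · have := ceil_le_self_of_pos cap p hcap h; omega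
    · have := ceil_le_of_le_zero cap p hcap (by omega); omega
  unfold tripsOf; push_cast; omega

-- ===== VERDICT (by name: the statement is the Claim_ definition above) =====
theorem solution_spec : Claim_equal_solution := by
  intro cap n deliveries pickups _hdom hpre
  obtain ⟨hcap, _, _⟩ := hpre
  unfold Spec_solution solution solution_alt
  have hstep : ∀ (st : Int × Int × Int) (i : Int),
      (let d := st.2.1 + PySem.List.pyGetD deliveries i 0
       let p := st.2.2 + PySem.List.pyGetD pickups i 0
       solInner cap i (d.toNat + p.toNat) (st.1, d, p)) =
      (let d := st.2.1 + PySem.List.pyGetD deliveries i 0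
       let p := st.2.2 + PySem.List.pyGetD pickups i 0
       let trips := max (max (-(PySem.Int.floordiv (-d) cap)) (-(PySem.Int.floordiv (-p) cap))) 0
       (st.1 + trips * (i + 1), d - trips * cap, p - trips * cap)) := by
    intro st i
    exact solInner_closed cap i hcap _ _ _ _ (trips_le_fuel cap _ _ hcap)
  have hfun : (fun (st : Int × Int × Int) (i : Int) =>
      solInner cap i ((st.2.1 + PySem.List.pyGetD deliveries i 0).toNat + (st.2.2 + PySem.List.pyGetD pickups i 0).toNat)
        (st.1, st.2.1 + PySem.List.pyGetD deliveries i 0, st.2.2 + PySem.List.pyGetD pickups i 0)) =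
      (fun (st : Int × Int × Int) (i : Int) =>
        let d := st.2.1 + PySem.List.pyGetD deliveries i 0
        let p := st.2.2 + PySem.List.pyGetD pickups i 0
        let trips := max (max (-(PySem.Int.floordiv (-d) cap)) (-(PySem.Int.floordiv (-p) cap))) 0
        (st.1 + trips * (i + 1), d - trips * cap, p - trips * cap)) :=
    funext fun st => funext fun i => hstep st i
  simp only [hfun]
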